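-- pv_equiv track=rewrite | github.com/RezmiCR/SaraiBot | main.py | config_call
-- ===== SOURCE A (Python) =====
-- def config_call(m_text):
--     m_text += ' '
--     words = []
--     nums = []
--     prev = ''
--     current = ''
--     for ch in m_text:
--         if ch != ' ':
--             current = current + ch
--             prev = ch
--         elif prev != ' ' and not prev.isnumeric():
--             words.append(current)
--             current = ''
--         elif prev != ' ' and current.isnumeric():
--             nums.append(current)
--             current = ''
--         else:
--             current = ''
--     return str(len(words)) + ' words, and ' + str(len(nums)) + ' nums'
-- ===== SOURCE B (Python) =====
-- def config_call(m_text):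
--     words = 0
--     nums = 0
--     digit_last = False   # the most recent non-space character was a digit
--     empty = True         # the current token has no characters yet
--     numeric = False      # the current token is non-empty and wholly numeric
--     for ch in m_text:
--         if ch == ' ':
--             if not digit_last:
--                 words += 1
--             elif numeric:
--                 nums += 1
--             empty = True
--             numeric = False
--         else:
--             numeric = ch.isnumeric() and (empty or numeric)
--             digit_last = ch.isnumeric()
--             empty = False
--     if not digit_last:
--         words += 1
--     elif numeric:
--         nums += 1
--     return str(words) + ' words, and ' + str(nums) + ' nums'
-- ===== Notes on version B (the rewrite author's own statement) =====
-- stated objective: alternative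
-- what changed: B replaces A's loop that accumulates each token as a string and appends it to words/nums lists (returning their lengths) with an O(1)-state streaming pass keeping two integer counters and three boolean flags, testing numerality incrementally per character instead of on whole token strings, and flushing the final token after the loop instead of appending a sentinel space.
import Mathlib
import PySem

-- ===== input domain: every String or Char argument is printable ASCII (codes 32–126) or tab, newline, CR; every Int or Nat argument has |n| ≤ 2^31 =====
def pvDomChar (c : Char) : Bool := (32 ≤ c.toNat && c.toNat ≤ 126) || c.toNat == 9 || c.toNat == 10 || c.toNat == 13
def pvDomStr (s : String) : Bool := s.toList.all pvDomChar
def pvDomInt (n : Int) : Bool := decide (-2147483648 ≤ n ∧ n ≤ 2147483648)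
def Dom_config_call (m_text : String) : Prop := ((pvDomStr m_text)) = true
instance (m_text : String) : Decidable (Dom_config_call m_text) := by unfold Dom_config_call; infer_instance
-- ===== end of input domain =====

-- B streams over the characters with two counters and three boolean flags (incremental
-- numeric test), instead of A's loop that builds token strings and appends them to lists
-- (objective: alternative, O(1) state instead of accumulated token strings).
-- (str.isnumeric is ported as PySem.Chars.strIsdigit / PySem.Chars.isdigit: they coincide
-- on the ASCII domain.)


-- ===== PORT A =====
-- loop body of A: state = (words, nums, prev, current)
def aStep (st : List (List Char) × List (List Char) × List Char × List Char) (ch : Char) :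
    List (List Char) × List (List Char) × List Char × List Char :=
  match st with
  | (words, nums, prev, current) =>
    if ch ≠ ' ' then (words, nums, [ch], current ++ [ch])
    else if prev ≠ [' '] ∧ ¬ PySem.Chars.strIsdigit prev then (words ++ [current], nums, prev, [])
    else if prev ≠ [' '] ∧ PySem.Chars.strIsdigit current then (words, nums ++ [current], prev, [])
    else (words, nums, prev, [])

def config_call (m_text : String) : String :=
  match (m_text.toList ++ [' ']).foldl aStep ([], [], [], []) with
  | (words, nums, _, _) =>
    String.ofList (PySem.Int.toChars (words.length : Int) ++ " words, and ".toList
      ++ PySem.Int.toChars (nums.length : Int) ++ " nums".toList)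

-- ===== PORT B =====
-- loop body of B: state = (words, nums, digit_last, empty, numeric)
def bStep (st : Int × Int × Bool × Bool × Bool) (ch : Char) : Int × Int × Bool × Bool × Bool :=
  match st with
  | (w, n, dl, e, nu) =>
    if ch = ' ' then
      if ¬ dl then (w + 1, n, dl, true, false)
      else if nu then (w, n + 1, dl, true, false)
      else (w, n, dl, true, false)
    else (w, n, PySem.Chars.isdigit ch, false, PySem.Chars.isdigit ch && (e || nu))

-- B's code after the loop: the final token is flushed once
def bFlush (st : Int × Int × Bool × Bool × Bool) : Int × Int :=
  match st with
  | (w, n, dl, _, nu) =>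
    if ¬ dl then (w + 1, n) else if nu then (w, n + 1) else (w, n)

def config_call_alt (m_text : String) : String :=
  match bFlush (m_text.toList.foldl bStep (0, 0, false, true, false)) with
  | (w, n) =>
    String.ofList (PySem.Int.toChars w ++ " words, and ".toList
      ++ PySem.Int.toChars n ++ " nums".toList)

-- ===== PRECONDITION & SPEC =====
def Spec_config_call (m_text : String) (out : String) : Prop := out = config_call_alt m_text
instance (m_text : String) (out : String) : Decidable (Spec_config_call m_text out) := by unfold Spec_config_call; infer_instance

-- ===== CLAIM (what is proved, stated in full; the proofs are below) =====
def Claim_equal_config_call : Prop :=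
  ∀ (m_text : String), Dom_config_call m_text → Spec_config_call m_text (config_call m_text)

-- ===== LEMMAS AND PROOFS =====

theorem strIsdigit_nil : PySem.Chars.strIsdigit ([] : List Char) = false := by
  simp [PySem.Chars.strIsdigit]

theorem strIsdigit_append_singleton (cs : List Char) (c : Char) :
    PySem.Chars.strIsdigit (cs ++ [c])
      = (PySem.Chars.isdigit c && (cs.isEmpty || PySem.Chars.strIsdigit cs)) := by
  by_cases h0 : cs = []
  · subst h0; simp [PySem.Chars.strIsdigit]
  · simp only [PySem.Chars.strIsdigit, List.isEmpty_eq_false_iff.2 h0, Bool.false_or]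
    cases hall : cs.all PySem.Chars.isdigit <;>
      cases hc : PySem.Chars.isdigit c <;>
        simp_all [List.all_append]

-- the invariant carried for A's prev variable
def invPrev (prev : List Char) : Prop := prev = [] ∨ ∃ c, prev = [c] ∧ c ≠ ' '

theorem invPrev_ne (prev : List Char) (h : invPrev prev) : prev ≠ [' '] := by
  rcases h with h | ⟨c, rfl, hc⟩ <;> simp_all

theorem strIsdigit_singleton (c : Char) :
    PySem.Chars.strIsdigit [c] = PySem.Chars.isdigit c := by
  simp [PySem.Chars.strIsdigit]

-- projection compared by the main lemma
def outA (st : List (List Char) × List (List Char) × List Char × List Char) : Int × Int :=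
  (st.1.length, st.2.1.length)

-- A's processing of one space mirrors B's space branch (and B's final flush)
theorem space_sync (words nums : List (List Char)) (prev current : List Char)
    (hp : invPrev prev) :
    aStep (words, nums, prev, current) ' '
      = if ¬ PySem.Chars.strIsdigit prev then (words ++ [current], nums, prev, [])
        else if PySem.Chars.strIsdigit current then (words, nums ++ [current], prev, [])
        else (words, nums, prev, []) := by
  have hne : prev ≠ [' '] := invPrev_ne prev hp
  by_cases hd : PySem.Chars.strIsdigit prev <;>
    by_cases hc : PySem.Chars.strIsdigit current <;>
      simp [aStep, hne, hd, hc]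

-- main loop correspondence: A over the remaining characters (with its appended space)
-- equals B over the remaining characters followed by B's flush, when the carried
-- state is related: dl = strIsdigit prev, e = current.isEmpty, nu = strIsdigit current
theorem loop_sync (cs : List Char) : ∀ (words nums : List (List Char)) (prev current : List Char),
    invPrev prev →
    outA ((cs ++ [' ']).foldl aStep (words, nums, prev, current))
      = bFlush (cs.foldl bStep ((words.length : Int), (nums.length : Int),
          PySem.Chars.strIsdigit prev, current.isEmpty, PySem.Chars.strIsdigit current)) := by
  induction cs with
  | nil =>
    intro words nums prev current hp
    rw [List.nil_append, List.foldl_cons, List.foldl_nil, List.foldl_nil,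
      space_sync words nums prev current hp]
    by_cases hd : PySem.Chars.strIsdigit prev <;>
      by_cases hc : PySem.Chars.strIsdigit current <;>
        simp [bFlush, outA, hd, hc]
  | cons c rest ih =>
    intro words nums prev current hp
    by_cases hc : c = ' '
    · subst hc
      rw [List.cons_append, List.foldl_cons, space_sync words nums prev current hp,
        List.foldl_cons]
      by_cases hd : PySem.Chars.strIsdigit prev
      · by_cases hcu : PySem.Chars.strIsdigit current
        · simpa [bStep, hd, hcu, strIsdigit_nil, Nat.cast_add, Nat.cast_one] using
            ih words (nums ++ [current]) prev [] hp
        · simpa [bStep, hd, hcu, strIsdigit_nil] using ih words nums prev [] hp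
      · simpa [bStep, hd, strIsdigit_nil, Nat.cast_add, Nat.cast_one] using
          ih (words ++ [current]) nums prev [] hp
    · have hstep : aStep (words, nums, prev, current) c = (words, nums, [c], current ++ [c]) := by
        simp [aStep, hc]
      have hb : bStep ((words.length : Int), (nums.length : Int), PySem.Chars.strIsdigit prev,
            current.isEmpty, PySem.Chars.strIsdigit current) c
          = ((words.length : Int), (nums.length : Int), PySem.Chars.strIsdigit [c],
            (current ++ [c]).isEmpty, PySem.Chars.strIsdigit (current ++ [c])) := by
        simp [bStep, hc, strIsdigit_singleton, strIsdigit_append_singleton]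
      rw [List.cons_append, List.foldl_cons, hstep, List.foldl_cons, hb]
      exact ih words nums [c] (current ++ [c]) (Or.inr ⟨c, rfl, hc⟩)

-- ===== VERDICT =====
theorem config_call_spec : Claim_equal_config_call := by
  intro m_text _
  unfold Spec_config_call config_call config_call_alt
  have h := loop_sync m_text.toList [] [] [] [] (Or.inl rfl)
  simp only [List.length_nil, Nat.cast_zero, List.isEmpty_nil, strIsdigit_nil] at h
  rcases ha : (m_text.toList ++ [' ']).foldl aStep ([], [], [], []) with ⟨ws, ns, p, cur⟩
  rcases hb : bFlush (m_text.toList.foldl bStep (0, 0, false, true, false)) with ⟨w, n⟩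
  rw [ha, hb] at h
  simp only [outA, Prod.mk.injEq] at h
  simp only [h.1, h.2]
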